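-- pv_equiv track=rewrite | github.com/plagesribeiro/Marvin | fase05/ex04/segundo.py | segundo
-- ===== SOURCE A (Python) =====
-- def segundo(lista):
--     i=0;
--     cont=0;
--     resp = [];
--
--     while(i<len(lista)):
--         if(cont == 1):
--             resp.append("Marvin");
--             cont = cont+1;
--         else:
--             resp.append(lista[i]);
--             i = i+1;
--             cont = cont+1;
--
--     return resp;
-- ===== SOURCE B (Python) =====
-- def segundo(lista):
--     if len(lista) <= 1:
--         return lista[:]
--     return [lista[0], "Marvin"] + lista[1:]
-- ===== Notes on version B (the rewrite author's own statement) =====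
-- stated objective: simpler
-- what changed: Replaces the counter-driven while loop that appends element by element with a loop-free closed-form slice concatenation [lista[0],'Marvin']+lista[1:] (guarded so lists of length <= 1 are returned as a copy exactly as A does); slicing in C beats the Python-level append loop by a constant factor.
import Mathlib
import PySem

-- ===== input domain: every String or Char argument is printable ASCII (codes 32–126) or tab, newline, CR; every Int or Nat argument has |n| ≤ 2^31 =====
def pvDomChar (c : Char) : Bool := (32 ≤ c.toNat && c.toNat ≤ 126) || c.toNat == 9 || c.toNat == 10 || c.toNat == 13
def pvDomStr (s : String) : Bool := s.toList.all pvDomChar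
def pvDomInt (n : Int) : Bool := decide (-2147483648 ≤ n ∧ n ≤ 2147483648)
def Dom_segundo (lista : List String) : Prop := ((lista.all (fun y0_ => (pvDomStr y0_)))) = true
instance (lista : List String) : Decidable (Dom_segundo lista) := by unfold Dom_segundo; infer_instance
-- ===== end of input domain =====

-- B copies A's list-of-strings insertion behaviour with a loop-free slice expression; return-value equivalence only (neither mutates).

-- ===== PORT A =====
-- the while loop of A: state (i, cont, resp); i, cont start at 0, both only grow.
-- lista[i] is read only when i < len, so List.getD is exact here.
def segundoLoop (lista : List String) (i cont : Nat) (resp : List String) : List String :=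
  if h : i < lista.length then
    if hc : cont = 1 then
      segundoLoop lista i (cont + 1) (resp ++ ["Marvin"])
    else
      segundoLoop lista (i + 1) (cont + 1) (resp ++ [lista.getD i ""])
  else
    resp
termination_by 2 * (lista.length - i) + (if cont = 1 then 1 else 0)
decreasing_by
  all_goals split_ifs <;> omega

def segundo (lista : List String) : List String :=
  segundoLoop lista 0 0 []

-- ===== PORT B =====
def segundo_alt (lista : List String) : List String :=
  if lista.length ≤ 1 then lista
  else [lista.getD 0 "", "Marvin"] ++ lista.drop 1

-- ===== PRECONDITION & SPEC =====
def Spec_segundo (lista : List String) (out : List String) : Prop := out = segundo_alt lista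
instance (lista : List String) (out : List String) : Decidable (Spec_segundo lista out) := by unfold Spec_segundo; infer_instance

-- ===== CLAIM (what is proved, stated in full; the proofs are below) =====
def Claim_equal_segundo : Prop := ∀ (lista : List String), Dom_segundo lista → Spec_segundo lista (segundo lista)

-- ===== LEMMAS AND PROOFS =====

-- once cont ≥ 2 the Marvin branch can never fire again: the loop just copies the tail
theorem segundoLoop_tail (lista : List String) (i cont : Nat) (resp : List String)
    (h2 : 2 ≤ cont) : segundoLoop lista i cont resp = resp ++ lista.drop i := by
  by_cases h : i < lista.length
  · rw [segundoLoop, dif_pos h, dif_neg (show ¬ cont = 1 by omega)]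
    rw [segundoLoop_tail lista (i + 1) (cont + 1) _ (by omega)]
    rw [List.drop_eq_getElem_cons h]
    simp [List.getD, List.getElem?_eq_getElem h]
  · rw [segundoLoop, dif_neg h, List.drop_of_length_le (by omega), List.append_nil]
termination_by lista.length - i
decreasing_by omega

-- ===== VERDICT (by name: the statement is the Claim_ definition above) =====
theorem segundo_spec : Claim_equal_segundo := by
  intro lista _
  show segundo lista = segundo_alt lista
  match lista with
  | [] => rw [segundo, segundoLoop]; simp [segundo_alt]
  | [a] =>
    rw [segundo, segundoLoop]; simp [segundoLoop, segundo_alt]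
  | a :: b :: rest =>
    rw [segundo, segundoLoop]
    simp only [List.length_cons, dif_pos (by omega : 0 < rest.length + 1 + 1)]
    rw [dif_neg (by omega : ¬ (0:Nat) = 1)]
    rw [segundoLoop, dif_pos (by simp), dif_pos rfl]
    rw [segundoLoop_tail _ _ _ _ (by omega)]
    simp [segundo_alt, List.getD]
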